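-- pv_equiv track=rewrite | github.com/r0hanshah/leetcode | sort.py | solution
-- ===== SOURCE A (Python) =====
-- def solution(a):
--     b = []
--     for elm in a:
--         b.append(elm)
--
--
--     a.sort()
--     a = [i for i in a if i != -1]
--     for index,num in enumerate(b):
--         if num == -1:
--             a.insert(index, num)
--
--     return a
-- ===== SOURCE B (Python) =====
-- def solution(a):
--     # Sort the non-(-1) values once, then a single merge pass copies -1s through
--     # and draws the next sorted value for every other slot.
--     # Note: A sorts its argument in place; B does not mutate (return value equal).
--     vals = iter(sorted(x for x in a if x != -1))
--     return [x if x == -1 else next(vals) for x in a]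
-- ===== Notes on version B (the rewrite author's own statement) =====
-- stated objective: alternative
-- what changed: Replaces the enumerate-and-insert loop (each -1 re-inserted by index into the sorted-then-filtered list) with sorting the non-(-1) values once and a single merge pass that keeps -1s in place; B also does not sort the argument in place.
import Mathlib
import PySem

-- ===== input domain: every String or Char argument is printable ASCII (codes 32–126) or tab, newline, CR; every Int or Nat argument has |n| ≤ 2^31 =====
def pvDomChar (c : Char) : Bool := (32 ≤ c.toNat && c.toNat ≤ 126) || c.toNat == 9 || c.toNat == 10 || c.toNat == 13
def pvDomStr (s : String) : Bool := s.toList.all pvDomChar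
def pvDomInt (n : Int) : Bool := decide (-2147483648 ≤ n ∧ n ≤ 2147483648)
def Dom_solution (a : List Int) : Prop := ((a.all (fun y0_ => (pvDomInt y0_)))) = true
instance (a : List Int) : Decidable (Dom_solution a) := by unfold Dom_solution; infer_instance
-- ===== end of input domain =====

-- B sorts the non-(-1) values once and fills them in with a single merge pass,
-- instead of A's loop that re-inserts each -1 by index into a growing list;
-- equivalence is about the RETURN value only (A sorts its list argument in
-- place, B does not mutate).


-- ===== PORT A =====
def solution (a : List Int) : List Int :=
  -- b = copy of a built by appending; a.sort(); a = [i for i in a if i != -1]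
  let b := a
  let a1 := PySem.List.sorted a (fun x => x) false
  let a2 := a1.filter (fun i => i != -1)
  -- for index, num in enumerate(b): if num == -1: a.insert(index, num)
  (PySem.List.enumerate b 0).foldl
    (fun acc p => if p.2 = -1 then PySem.List.insert acc p.1 p.2 else acc) a2

-- ===== PORT B =====
-- the merge pass: 'x if x == -1 else next(vals)' over a; the iterator is the
-- remaining sorted list (the empty-iterator branch is never reached: the
-- iterator holds exactly one value per non-(-1) element of a)
def altGo : List Int → List Int → List Int
  | [], _ => []
  | x :: xs, s =>
    if x = -1 then -1 :: altGo xs s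
    else
      match s with
      | y :: rest => y :: altGo xs rest
      | [] => []

def solution_alt (a : List Int) : List Int :=
  altGo a (PySem.List.sorted (a.filter (fun x => x != -1)) (fun x => x) false)

-- ===== PRECONDITION & SPEC =====
def Spec_solution (a : List Int) (out : List Int) : Prop := out = solution_alt a
instance (a : List Int) (out : List Int) : Decidable (Spec_solution a out) := by unfold Spec_solution; infer_instance

-- ===== CLAIM (what is proved, stated in full; the proofs are below) =====
def Claim_equal_solution : Prop := ∀ (a : List Int), Dom_solution a → Spec_solution a (solution a)

-- ===== LEMMAS AND PROOFS =====

-- A's insertion loop, started at index n = |merged| on the list merged ++ s,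
-- merges the suffix bs with s exactly as altGo does, provided s holds one value
-- per non-(-1) element of bs.
lemma loop_eq (bs : List Int) :
    ∀ (s merged : List Int), s.length = (bs.filter (fun x => x != -1)).length →
    (PySem.List.enumerate bs (merged.length : Int)).foldl
      (fun acc p => if p.2 = -1 then PySem.List.insert acc p.1 p.2 else acc)
      (merged ++ s)
    = merged ++ altGo bs s := by
  induction bs with
  | nil =>
    intro s merged hlen
    simp at hlen
    simp [PySem.List.enumerate_nil, altGo, hlen]
  | cons x xs ih =>
    intro s merged hlen
    rw [PySem.List.enumerate_cons]
    by_cases hx : x = -1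
    · subst hx
      simp only [List.foldl_cons, ↓reduceIte]
      rw [PySem.List.insert_natCast (merged ++ s) merged.length (-1) (by simp),
        List.take_left, List.drop_left]
      have : merged ++ -1 :: s = (merged ++ [-1]) ++ s := by simp
      rw [this]
      have hlen' : s.length = (xs.filter (fun x => x != -1)).length := by
        simpa using hlen
      have := ih s (merged ++ [-1]) hlen'
      simp only [List.length_append, List.length_cons, List.length_nil] at this ⊢
      rw [show ((merged.length : Int) + 1) = ((merged.length + (0 + 1) : Nat) : Int) by push_cast; ring]
      rw [this]
      simp [altGo]
    · have hfx : (fun x : Int => x != -1) x = true := by simp [hx]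
      simp only [List.filter_cons, hfx, if_pos, List.length_cons] at hlen
      match s, hlen with
      | y :: rest, hlen =>
        have hlen' : rest.length = (xs.filter (fun x => x != -1)).length := by
          simpa using hlen
        simp only [List.foldl_cons, if_neg hx]
        have : merged ++ y :: rest = (merged ++ [y]) ++ rest := by simp
        rw [this]
        have := ih rest (merged ++ [y]) hlen'
        simp only [List.length_append, List.length_cons, List.length_nil] at this ⊢
        rw [show ((merged.length : Int) + 1) = ((merged.length + (0 + 1) : Nat) : Int) by push_cast; ring]
        rw [this]
        simp [altGo, hx]

-- filtering commutes with sorting here: filter(≠ -1) of sorted(a) IS sorted(filter(≠ -1) a)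
lemma filter_sorted_eq (a : List Int) :
    (PySem.List.sorted a (fun x => x) false).filter (fun i => i != -1)
    = PySem.List.sorted (a.filter (fun x => x != -1)) (fun x => x) false := by
  symm
  apply PySem.List.sorted_id_eq_of_perm_of_pairwise
  · exact (PySem.List.sorted_perm a (fun x => x) false).filter _
  · exact List.Pairwise.filter _ (PySem.List.sorted_pairwise a (fun x => x))

theorem solution_spec_aux (a : List Int) : solution a = solution_alt a := by
  simp only [solution, solution_alt]
  rw [filter_sorted_eq]
  have hlen : (PySem.List.sorted (a.filter (fun x => x != -1)) (fun x => x) false).length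
      = (a.filter (fun x => x != -1)).length :=
    (PySem.List.sorted_perm _ _ _).length_eq
  have := loop_eq a (PySem.List.sorted (a.filter (fun x => x != -1)) (fun x => x) false) [] hlen
  simpa using this

-- ===== VERDICT (by name: the statement is the Claim_ definition above) =====
theorem solution_spec : Claim_equal_solution := by
  intro a _
  exact solution_spec_aux a
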